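-- pv_equiv track=rewrite | github.com/gutter-mouth/InchwormMeasurement | inchworm_measurement/simulator.py | generate_idx
-- ===== SOURCE A (Python) =====
-- def generate_idx(length, period):
--     idx_camera = []
--     idx_spot = []
--     is_camera_moved = []
--     for i in range(0, length, period):
--         for j in range(period + 1):
--             idx_camera.append(i + j)
--             idx_spot.append(i)
--     for i in range(len(idx_camera) - 1):
--         if idx_camera[i] == idx_camera[i + 1]:
--             is_camera_moved.append(0)
--         else:
--             is_camera_moved.append(1)
--     return idx_camera, idx_spot, is_camera_moved
-- ===== SOURCE B (Python) =====
-- def generate_idx(length, period):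
--     # Closed-form construction: compute the number of blocks n arithmetically,
--     # derive idx_camera/idx_spot by div/mod indexing over a single flat range,
--     # and emit is_camera_moved as a repeated pattern instead of pairwise compares.
--     if period <= 0:
--         # non-positive period: each block range(period + 1) is empty
--         return [], [], []
--     block = period + 1
--     n = -((-length) // period)  # ceil(length / period)
--     if n < 0:
--         n = 0
--     total = n * block
--     idx_camera = [(k // block) * period + (k % block) for k in range(total)]
--     idx_spot = [(k // block) * period for k in range(total)]
--     if n == 0:
--         is_camera_moved = []
--     else:
--         is_camera_moved = ([1] * period + [0]) * (n - 1) + [1] * period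
--     return idx_camera, idx_spot, is_camera_moved
-- ===== Notes on version B (the rewrite author's own statement) =====
-- stated objective: alternative
-- what changed: Replaces A's nested append loops and indexed pairwise re-scan of idx_camera by a closed-form construction: the block count via ceiling division, idx_camera/idx_spot by div/mod indexing over one flat range, and is_camera_moved emitted directly as the repeated pattern [1]*period+[0] with no comparisons.
import Mathlib
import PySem

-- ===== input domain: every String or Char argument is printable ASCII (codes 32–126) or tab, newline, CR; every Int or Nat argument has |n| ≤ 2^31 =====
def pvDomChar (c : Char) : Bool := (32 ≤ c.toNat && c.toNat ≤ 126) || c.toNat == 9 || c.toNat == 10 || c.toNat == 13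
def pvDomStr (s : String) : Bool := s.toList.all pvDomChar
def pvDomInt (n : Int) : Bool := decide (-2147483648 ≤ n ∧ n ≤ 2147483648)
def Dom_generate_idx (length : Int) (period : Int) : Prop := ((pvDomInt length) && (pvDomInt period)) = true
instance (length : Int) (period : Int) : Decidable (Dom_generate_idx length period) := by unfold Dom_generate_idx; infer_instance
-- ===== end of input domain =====

-- B replaces A's nested append loops and pairwise-comparison pass by a closed-form
-- construction (block count by ceiling division, div/mod indexing, repeated pattern);
-- objective: alternative (same asymptotic cost, no indexed re-scan of idx_camera).

-- ===== PORT A =====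
-- the two lists appended to in the same loop are carried as a pair;
-- idx_camera[i] with i always in range is ported as pyGetD (exact here)
def generate_idx (length : Int) (period : Int) : List Int × List Int × List Int :=
  let cs : List Int × List Int :=
    (PySem.List.pyRange 0 length period).foldl
      (fun (q : List Int × List Int) i =>
        (PySem.List.pyRange 0 (period + 1) 1).foldl
          (fun (r : List Int × List Int) j => (r.1 ++ [i + j], r.2 ++ [i])) q)
      ([], [])
  let idx_camera := cs.1
  let idx_spot := cs.2
  let is_camera_moved : List Int :=
    (PySem.List.pyRange 0 (PySem.List.len idx_camera - 1) 1).foldl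
      (fun acc i =>
        if PySem.List.pyGetD idx_camera i 0 = PySem.List.pyGetD idx_camera (i + 1) 0
        then acc ++ [0] else acc ++ [1]) []
  (idx_camera, idx_spot, is_camera_moved)

-- ===== PORT B =====
def generate_idx_alt (length : Int) (period : Int) : List Int × List Int × List Int :=
  if period ≤ 0 then ([], [], [])
  else
    let block := period + 1
    let n0 := -(PySem.Int.floordiv (-length) period)
    let n := if n0 < 0 then 0 else n0
    let total := n * block
    let idx_camera := (PySem.List.pyRange 0 total 1).map
      (fun k => PySem.Int.floordiv k block * period + PySem.Int.mod k block)
    let idx_spot := (PySem.List.pyRange 0 total 1).map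
      (fun k => PySem.Int.floordiv k block * period)
    let is_camera_moved : List Int :=
      if n = 0 then []
      else (List.replicate (n - 1).toNat
              (List.replicate period.toNat (1 : Int) ++ [0])).flatten
           ++ List.replicate period.toNat (1 : Int)
    (idx_camera, idx_spot, is_camera_moved)

-- ===== PRECONDITION & SPEC =====
-- Pre_ excludes only period = 0, where Python's range(0, length, 0) raises ValueError.
def Pre_generate_idx (length : Int) (period : Int) : Prop := period ≠ 0
instance (length : Int) (period : Int) : Decidable (Pre_generate_idx length period) := by
  unfold Pre_generate_idx; infer_instance
def pvWitness_generate_idx : Int × Int := (10, 3)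

def Spec_generate_idx (length : Int) (period : Int) (out : List Int × List Int × List Int) : Prop :=
  out = generate_idx_alt length period
instance (length : Int) (period : Int) (out : List Int × List Int × List Int) : Decidable (Spec_generate_idx length period out) := by unfold Spec_generate_idx; infer_instance

-- ===== CLAIM (what is proved, stated in full; the proofs are below) =====
def Claim_equal_generate_idx : Prop := ∀ (length : Int) (period : Int), Dom_generate_idx length period → Pre_generate_idx length period → Spec_generate_idx length period (generate_idx length period)

-- ===== LEMMAS AND PROOFS =====

-- A's inner loop appends one block to both lists of the pair state
lemma inner_fold (R : List Int) (c s : List Int) (i : Int) :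
    R.foldl (fun (r : List Int × List Int) j => (r.1 ++ [i + j], r.2 ++ [i])) (c, s)
      = (c ++ R.map (fun j => i + j), s ++ R.map (fun _ => i)) := by
  induction R generalizing c s with
  | nil => simp
  | cons x xs ih => simp [List.foldl_cons, ih]

-- A's outer loop flat-maps the blocks
lemma outer_fold (S : List Int) (R : List Int) (c s : List Int) :
    S.foldl (fun (q : List Int × List Int) i =>
        R.foldl (fun (r : List Int × List Int) j => (r.1 ++ [i + j], r.2 ++ [i])) q) (c, s)
      = (c ++ S.flatMap (fun i => R.map (fun j => i + j)),
         s ++ S.flatMap (fun i => R.map (fun _ => i))) := by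
  induction S generalizing c s with
  | nil => simp
  | cons x xs ih => simp [List.foldl_cons, inner_fold, ih]

-- div/mod indexing over one flat range equals the flat-map of blocks of constant length L
lemma flat_blocks (L : Nat) (g : Nat → Nat → Int) :
    ∀ N : Nat, (List.range (N * L)).map (fun k => g (k / L) (k % L))
      = (List.range N).flatMap (fun t => (List.range L).map (fun j => g t j)) := by
  intro N
  induction N with
  | zero => simp
  | succ N ih =>
    rcases Nat.eq_zero_or_pos L with hL | hL
    · simp [hL]
    · have h : (N + 1) * L = N * L + L := by ring
      rw [h, List.range_add, List.map_append, ih, List.range_succ, List.flatMap_append]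
      congr 1
      · simp
        intro j hjL
        have h1 : (N * L + j) / L = N := by
          rw [Nat.mul_comm N L, Nat.mul_add_div hL]
          simp [Nat.div_eq_of_lt hjL]
        rw [h1, Nat.mod_eq_of_lt hjL]

-- a prefix of the difference pattern that never crosses a block boundary is all ones
lemma ones_prefix (L : Nat) (hL : 2 ≤ L) (m : Nat) (hm : m ≤ L - 1) :
    (List.range m).map (fun i => if (i + 1) % L = 0 then (0 : Int) else 1)
      = List.replicate m 1 := by
  induction m with
  | zero => simp
  | succ m ih =>
    rw [List.range_succ, List.map_append, ih (by omega), List.replicate_succ']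
    have h1 : (m + 1) % L = m + 1 := Nat.mod_eq_of_lt (by omega)
    simp [h1]

-- the adjacent-difference pattern over N blocks of length L is ([1]*(L-1)+[0]) repeated, last 0 dropped
lemma pattern_map (L : Nat) (hL : 2 ≤ L) :
    ∀ N : Nat, 1 ≤ N →
      (List.range (N * L - 1)).map (fun i => if (i + 1) % L = 0 then (0 : Int) else 1)
        = (List.replicate (N - 1) (List.replicate (L - 1) (1 : Int) ++ [0])).flatten
          ++ List.replicate (L - 1) (1 : Int) := by
  intro N hN
  induction N, hN using Nat.le_induction with
  | base => simpa using ones_prefix L hL (L - 1) (le_refl _)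
  | succ N hN ih =>
    obtain ⟨m, hm⟩ : ∃ m, N * L = m := ⟨_, rfl⟩
    have hm1 : 1 ≤ m := by
      have := Nat.mul_le_mul hN (show 2 ≤ L from hL); omega
    have hsplit : (N + 1) * L - 1 = (m - 1) + L := by
      rw [Nat.succ_mul, hm]; omega
    rw [hsplit, List.range_add, List.map_append]
    rw [hm] at ih
    rw [ih]
    have hzero : (List.range L).map (fun j => if j = 0 then (0 : Int) else 1)
        = 0 :: List.replicate (L - 1) (1 : Int) := by
      obtain ⟨K, rfl⟩ : ∃ K, L = K + 1 := ⟨L - 1, by omega⟩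
      rw [List.range_succ_eq_map]
      simp only [List.map_cons, List.map_map]
      simp [Function.comp_def, Nat.succ_eq_add_one]
    have hsecond : (List.map (fun x => m - 1 + x) (List.range L)).map
          (fun i => if (i + 1) % L = 0 then (0 : Int) else 1)
        = 0 :: List.replicate (L - 1) (1 : Int) := by
      rw [List.map_map]
      have hc : ∀ j ∈ List.range L,
          ((fun i => if (i + 1) % L = 0 then (0 : Int) else 1) ∘ (fun x => m - 1 + x)) j
            = (fun j => if j = 0 then (0 : Int) else 1) j := by
        intro j hj
        have hjL : j < L := List.mem_range.mp hj
        have h2 : m - 1 + j + 1 = m + j := by omega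
        have h3 : (m + j) % L = j % L := by rw [← hm, Nat.mul_comm N L, Nat.mul_add_mod]
        have h4 : j % L = j := Nat.mod_eq_of_lt hjL
        simp [Function.comp, h2, h3, h4]
      rw [List.map_congr_left hc, hzero]
    rw [hsecond]
    have hNrw : N + 1 - 1 = (N - 1) + 1 := by omega
    rw [hNrw, List.replicate_succ', List.flatten_append]
    simp

-- two adjacent flat-index values agree exactly at a block boundary
lemma step_cond (P : Nat) (i : Nat) :
    (((P : Int) * ↑(i / (P + 1)) + ↑(i % (P + 1))) = ↑P * ↑((i + 1) / (P + 1)) + ↑((i + 1) % (P + 1)))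
      ↔ (i + 1) % (P + 1) = 0 := by
  have hL : 0 < P + 1 := by omega
  have hid : (P + 1) * (i / (P + 1)) + i % (P + 1) = i := Nat.div_add_mod i (P + 1)
  have hmlt : i % (P + 1) < P + 1 := Nat.mod_lt _ hL
  by_cases hr : i % (P + 1) = P
  · have he : i + 1 = (P + 1) * (i / (P + 1) + 1) := by
      calc i + 1 = ((P + 1) * (i / (P + 1)) + i % (P + 1)) + 1 := by rw [hid]
        _ = (P + 1) * (i / (P + 1)) + (P + 1) := by rw [hr, Nat.add_assoc]
        _ = (P + 1) * (i / (P + 1) + 1) := by ring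
    have hdiv : (i + 1) / (P + 1) = i / (P + 1) + 1 := by
      rw [he, Nat.mul_div_cancel_left _ hL]
    have hmod : (i + 1) % (P + 1) = 0 := by rw [he]; exact Nat.mul_mod_right _ _
    rw [hdiv, hmod, hr]
    simp only [Nat.cast_zero, add_zero, iff_true]
    push_cast
    ring
  · have hrlt : i % (P + 1) + 1 < P + 1 := by omega
    have he : i + 1 = (P + 1) * (i / (P + 1)) + (i % (P + 1) + 1) := by
      conv_lhs => rw [← hid]
      rw [Nat.add_assoc]
    have hdiv : (i + 1) / (P + 1) = i / (P + 1) := by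
      rw [he, Nat.mul_add_div hL, Nat.div_eq_of_lt hrlt, Nat.add_zero]
    have hmod : (i + 1) % (P + 1) = i % (P + 1) + 1 := by
      rw [he, Nat.mul_add_mod, Nat.mod_eq_of_lt hrlt]
    rw [hdiv, hmod]
    constructor
    · intro h
      have h2 : ((i % (P + 1) : Nat) : Int) = ((i % (P + 1) + 1 : Nat) : Int) := by
        push_cast at h ⊢
        linarith
      have h3 : i % (P + 1) = i % (P + 1) + 1 := by exact_mod_cast h2
      omega
    · intro h; omega

-- a loop appending 0/1 per element is the corresponding map
lemma foldl_if_append {α : Type} (c : α → Prop) [DecidablePred c] (l : List α) (acc : List Int) :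
    l.foldl (fun acc x => if c x then acc ++ [(0:Int)] else acc ++ [1]) acc
      = acc ++ l.map (fun x => if c x then (0:Int) else 1) := by
  induction l generalizing acc with
  | nil => simp
  | cons x xs ih => by_cases h : c x <;> simp [h, ih]

-- ===== VERDICT =====
theorem generate_idx_spec : Claim_equal_generate_idx := by
  intro length period _ hpre
  unfold Spec_generate_idx
  rcases lt_trichotomy period 0 with hneg | h0 | hpos
  · -- period < 0: every inner block is empty, everything is empty
    have hR : PySem.List.pyRange 0 (period + 1) 1 = [] :=
      PySem.List.pyRange_one_eq_nil (by omega)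
    have hB : generate_idx_alt length period = ([], [], []) := by
      unfold generate_idx_alt; rw [if_pos (by omega : period ≤ 0)]
    rw [hB]
    unfold generate_idx
    simp only [hR, List.foldl_nil, PySem.List.foldl_ignore]
    have h2 : PySem.List.pyRange 0 (PySem.List.len ([] : List Int) - 1) 1 = [] :=
      PySem.List.pyRange_one_eq_nil (by simp [PySem.List.len_eq])
    simp only [h2, List.foldl_nil]
  · exact absurd h0 hpre
  · -- 0 < period
    have hper : period = (period.toNat : Int) := by omega
    have hP1 : 1 ≤ period.toNat := by omega
    -- abbreviations (plain Nat values)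
    obtain ⟨P, hPdef⟩ : ∃ P, period.toNat = P := ⟨_, rfl⟩
    rw [hPdef] at hper hP1
    obtain ⟨Ncount, hNdef⟩ : ∃ N, (if (0:Int) < length then ((length + period - 1) / period).toNat else 0) = N := ⟨_, rfl⟩
    have hS : PySem.List.pyRange 0 length period
        = (List.range Ncount).map (fun k : Nat => period * (k : Int)) := by
      rw [PySem.List.pyRange_of_pos 0 length hpos]
      simp only [sub_zero, zero_add]
      rw [hNdef]
    have hR : PySem.List.pyRange 0 (period + 1) 1
        = (List.range (P + 1)).map (fun j : Nat => (j : Int)) := by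
      rw [PySem.List.pyRange_one]
      have h2 : ((period : Int) + 1 - 0).toNat = P + 1 := by omega
      rw [h2]
      simp only [zero_add]
    -- the block count computed by B equals Ncount
    have hn : (if -(PySem.Int.floordiv (-length) period) < 0 then 0 else -(PySem.Int.floordiv (-length) period)) = (Ncount : Int) := by
      by_cases hlen : (0:Int) < length
      · obtain ⟨q, hqdef⟩ : ∃ q, (length + period - 1) / period = q := ⟨_, rfl⟩
        have he : period * ((length + period - 1) / period) + (length + period - 1) % period
            = length + period - 1 := Int.mul_ediv_add_emod _ _
        have hr1 : 0 ≤ (length + period - 1) % period := Int.emod_nonneg _ (by omega)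
        have hr2 : (length + period - 1) % period < period := Int.emod_lt_of_pos _ hpos
        rw [hqdef] at he
        have hq : -(PySem.Int.floordiv (-length) period) = q := by
          rw [PySem.Int.neg_floordiv_neg_eq_iff_of_pos hpos]
          constructor <;> nlinarith [he, hr1, hr2]
        have hq1 : 1 ≤ q := by nlinarith [he, hr1, hr2]
        rw [hq, if_neg (by omega)]
        rw [← hNdef, if_pos hlen, hqdef]
        omega
      · have hnn : 0 ≤ PySem.Int.floordiv (-length) period := by
          rw [PySem.Int.floordiv_eq_ediv_of_pos hpos]
          exact Int.ediv_nonneg (by omega) (by omega)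
        rw [← hNdef, if_neg hlen]
        split_ifs <;> omega
    obtain ⟨M, hMdef⟩ : ∃ M, Ncount * (P + 1) = M := ⟨_, rfl⟩
    unfold generate_idx generate_idx_alt
    rw [if_neg (by omega : ¬ period ≤ 0)]
    simp only [hS, hR, hn]
    rw [outer_fold]
    simp only [List.nil_append]
    have hcam : List.flatMap (fun i => List.map (fun j => i + j) (List.map (fun j : Nat => (j:Int)) (List.range (P+1)))) (List.map (fun k : Nat => period * (k:Int)) (List.range Ncount))
        = (List.range M).map (fun k : Nat => period * ((k/(P+1) : Nat) : Int) + ((k % (P+1) : Nat) : Int)) := by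
      rw [List.flatMap_map]
      simp only [List.map_map, Function.comp_def]
      rw [← hMdef, flat_blocks (P+1) (fun t j => period * (t:Int) + (j:Int)) Ncount]
    have hspot : List.flatMap (fun i => List.map (fun _ : Int => i) (List.map (fun j : Nat => (j:Int)) (List.range (P+1)))) (List.map (fun k : Nat => period * (k:Int)) (List.range Ncount))
        = (List.range M).map (fun k : Nat => period * ((k/(P+1) : Nat) : Int)) := by
      rw [List.flatMap_map]
      simp only [List.map_map, Function.comp_def]
      rw [← hMdef, flat_blocks (P+1) (fun t _ => period * (t:Int)) Ncount]
    have htot : ((Ncount:Int)) * (period + 1) = ((M:Nat):Int) := by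
      rw [← hMdef, hper]; push_cast; ring
    have hb : (period:Int) + 1 = ((P+1 : Nat) : Int) := by rw [hper]; push_cast; ring
    have hBcam : (PySem.List.pyRange 0 ((Ncount:Int) * (period + 1)) 1).map
          (fun k => PySem.Int.floordiv k (period+1) * period + PySem.Int.mod k (period+1))
        = (List.range M).map (fun k : Nat => period * ((k/(P+1) : Nat) : Int) + ((k % (P+1) : Nat) : Int)) := by
      rw [htot, PySem.List.pyRange_one]
      have htN : (((M:Nat):Int) - 0).toNat = M := by omega
      rw [htN, List.map_map]
      apply List.map_congr_left
      intro k _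
      simp only [Function.comp_def, zero_add]
      rw [hb, PySem.Int.floordiv_natCast, PySem.Int.mod_natCast]
      ring
    have hBspot : (PySem.List.pyRange 0 ((Ncount:Int) * (period + 1)) 1).map
          (fun k => PySem.Int.floordiv k (period+1) * period)
        = (List.range M).map (fun k : Nat => period * ((k/(P+1) : Nat) : Int)) := by
      rw [htot, PySem.List.pyRange_one]
      have htN : (((M:Nat):Int) - 0).toNat = M := by omega
      rw [htN, List.map_map]
      apply List.map_congr_left
      intro k _
      simp only [Function.comp_def, zero_add]
      rw [hb, PySem.Int.floordiv_natCast]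
      ring
    rw [hcam, hspot, hBcam, hBspot]
    obtain ⟨camF, hcamF⟩ : ∃ l, (List.range M).map (fun k : Nat => period * ((k/(P+1) : Nat) : Int) + ((k % (P+1) : Nat) : Int)) = l := ⟨_, rfl⟩
    rw [hcamF]
    have hget : ∀ k : Nat, k < M → PySem.List.pyGetD camF (k:Int) 0
        = period * ((k/(P+1) : Nat) : Int) + ((k % (P+1) : Nat) : Int) := by
      intro k hk
      rw [← hcamF, PySem.List.pyGetD_natCast, List.getD_eq_getElem?_getD,
          List.getElem?_map, List.getElem?_range hk]
      rfl
    have hlen : PySem.List.len camF = (M:Int) := by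
      rw [← hcamF]; simp [PySem.List.len_eq]
    rw [hlen]
    rw [PySem.List.pyRange_one]
    have hM1 : (((M:Nat):Int) - 1 - 0).toNat = M - 1 := by omega
    rw [hM1]
    congr 1
    congr 1
    refine (foldl_if_append (fun i => PySem.List.pyGetD camF i 0 = PySem.List.pyGetD camF (i + 1) 0) _ []).trans ?_
    simp only [List.nil_append, List.map_map, Function.comp_def, zero_add]
    have hicm : (List.range (M-1)).map
          (fun k : Nat => if PySem.List.pyGetD camF (k:Int) 0 = PySem.List.pyGetD camF ((k:Int)+1) 0 then (0:Int) else 1)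
        = (List.range (M-1)).map (fun i => if (i+1) % (P+1) = 0 then (0:Int) else 1) := by
      apply List.map_congr_left
      intro k hk
      have hk1 : k < M - 1 := List.mem_range.mp hk
      have hkM : k < M := by omega
      have hk2 : k + 1 < M := by omega
      have hcast : ((k:Int) + 1) = ((k+1 : Nat) : Int) := by push_cast; ring
      rw [hcast, hget k hkM, hget (k+1) hk2, hper]
      by_cases hc : (k+1) % (P+1) = 0
      · rw [if_pos ((step_cond P k).mpr hc), if_pos hc]
      · rw [if_neg (fun h => hc ((step_cond P k).mp h)), if_neg hc]
    rw [hicm]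
    have hcN : ((Ncount:Int) - 1).toNat = Ncount - 1 := by omega
    rw [hcN, hPdef]
    by_cases hN0 : Ncount = 0
    · subst hN0
      simp only [Nat.zero_mul] at hMdef
      rw [← hMdef]
      simp
    · rw [if_neg (show ¬((Ncount:Int) = 0) by exact_mod_cast hN0)]
      rw [← hMdef, pattern_map (P+1) (by omega) Ncount (by omega)]
      simp
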